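-- pv_equiv track=rewrite | github.com/Arsen1302/Code-copy-detector | TestData/solutions/problem_1137_5.py | solution_1137_5
-- ===== SOURCE A (Python) =====
-- from typing import List
--
-- def solution_1137_5(allowed: str, words: List[str]) -> int:
--     count = 0
--     allowed = set(allowed)
--     for i in words:
--         for letter in i:
--             if letter not in allowed:
--                 count += 1
--                 break
--     return len(words) - count
-- ===== SOURCE B (Python) =====
-- def solution_1137_5(allowed, words):
--     delete = str.maketrans('', '', allowed)
--     return sum(1 for w in words if not w.translate(delete))
-- ===== Notes on version B (the rewrite author's own statement) =====
-- stated objective: alternative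
-- what changed: B builds a deletion translation table from the allowed letters once and, instead of scanning letters with an early break and counting failures to subtract, deletes all allowed characters from each word with str.translate and counts directly the words whose residual string is empty.
import Mathlib
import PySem

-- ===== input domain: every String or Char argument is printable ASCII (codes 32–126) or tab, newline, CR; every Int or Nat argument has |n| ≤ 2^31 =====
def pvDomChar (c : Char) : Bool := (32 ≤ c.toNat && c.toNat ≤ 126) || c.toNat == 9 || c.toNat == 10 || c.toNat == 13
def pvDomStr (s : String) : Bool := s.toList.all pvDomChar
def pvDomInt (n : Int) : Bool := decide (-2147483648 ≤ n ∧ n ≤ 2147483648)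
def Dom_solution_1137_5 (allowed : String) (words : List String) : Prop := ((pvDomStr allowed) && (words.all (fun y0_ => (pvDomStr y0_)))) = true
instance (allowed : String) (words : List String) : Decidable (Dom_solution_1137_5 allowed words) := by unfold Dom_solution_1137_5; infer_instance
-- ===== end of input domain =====

-- B deletes all allowed characters from each word via a str.translate deletion table and
-- counts the words left empty, instead of A's inner letter loop with break counting
-- failures and subtracting (objective: alternative).
-- ===== PORT A =====
-- inner 'for letter in i: if letter not in allowed: count += 1; break'
def pvScanA (aset : PySem.Set Char) (cs : List Char) : Int :=
  match cs with
  | [] => 0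
  | c :: rest => if ¬ PySem.Set.contains aset c then 1 else pvScanA aset rest

def solution_1137_5 (allowed : String) (words : List String) : Int :=
  let aset := PySem.Set.ofList allowed.toList
  let count := words.foldl (fun count i => count + pvScanA aset i.toList) 0
  (words.length : Int) - count

-- ===== PORT B =====
-- str.maketrans('', '', allowed) + w.translate(delete) deletes every occurrence of an
-- allowed character: ported as a filter keeping the characters not in the allowed set
-- (exact on the ASCII domain, where chars and code points correspond one-to-one).
def solution_1137_5_alt (allowed : String) (words : List String) : Int :=
  let del := PySem.Set.ofList allowed.toList
  words.foldl (fun acc w =>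
    if (w.toList.filter (fun c => ¬ PySem.Set.contains del c)).isEmpty then acc + 1 else acc) 0

-- ===== PRECONDITION & SPEC =====
def Spec_solution_1137_5 (allowed : String) (words : List String) (out : Int) : Prop := out = solution_1137_5_alt allowed words
instance (allowed : String) (words : List String) (out : Int) : Decidable (Spec_solution_1137_5 allowed words out) := by unfold Spec_solution_1137_5; infer_instance

-- ===== CLAIM (what is proved, stated in full; the proofs are below) =====
def Claim_equal_solution_1137_5 : Prop := ∀ (allowed : String) (words : List String), Dom_solution_1137_5 allowed words → Spec_solution_1137_5 allowed words (solution_1137_5 allowed words)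

-- ===== LEMMAS AND PROOFS =====
-- A's scan yields 0 iff every letter of the word is allowed
lemma pvScanA_eq (aset : PySem.Set Char) (cs : List Char) :
    pvScanA aset cs = (if cs.all (PySem.Set.contains aset) then 0 else 1) := by
  induction cs with
  | nil => simp [pvScanA]
  | cons c rest ih =>
    simp only [pvScanA, List.all_cons, Bool.and_eq_true]
    by_cases h : PySem.Set.contains aset c = true <;>
      simp_all [PySem.Set.contains] <;> tauto

-- the residual after deleting allowed characters is empty iff every character is allowed
lemma filter_empty_iff_all (aset : PySem.Set Char) (cs : List Char) :
    (cs.filter (fun c => ¬ PySem.Set.contains aset c)).isEmpty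
      = cs.all (PySem.Set.contains aset) := by
  induction cs with
  | nil => simp
  | cons c rest ih =>
    simp only [List.filter_cons, List.all_cons, PySem.Set.contains_eq_listContains,
      List.contains_eq_mem, decide_not, decide_eq_true_eq] at ih ⊢
    by_cases h : c ∈ aset <;> simp [h, ih]

lemma foldl_shift (aset : PySem.Set Char) (ws : List String) (a : Int) :
    ws.foldl (fun count i => count + pvScanA aset i.toList) a
      = a + ws.foldl (fun count i => count + pvScanA aset i.toList) 0 := by
  induction ws generalizing a with
  | nil => simp
  | cons w ws ih => simp only [List.foldl_cons]; rw [ih, ih (0 + _)]; ring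

lemma foldlB_shift (aset : PySem.Set Char) (ws : List String) (a : Int) :
    ws.foldl (fun acc w => if (w.toList.filter (fun c => ¬ PySem.Set.contains aset c)).isEmpty then acc + 1 else acc) a
      = a + ws.foldl (fun acc w => if (w.toList.filter (fun c => ¬ PySem.Set.contains aset c)).isEmpty then acc + 1 else acc) 0 := by
  induction ws generalizing a with
  | nil => simp
  | cons w ws ih =>
    simp only [List.foldl_cons]
    split_ifs with h
    · rw [ih (a + 1), ih (0 + 1)]; ring
    · exact ih a

lemma main_lemma (aset : PySem.Set Char) (ws : List String) :
    (ws.length : Int) - ws.foldl (fun count i => count + pvScanA aset i.toList) 0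
      = ws.foldl (fun acc w => if (w.toList.filter (fun c => ¬ PySem.Set.contains aset c)).isEmpty then acc + 1 else acc) 0 := by
  induction ws with
  | nil => simp
  | cons w ws ih =>
    simp only [List.foldl_cons, List.length_cons]
    rw [foldl_shift, foldlB_shift, pvScanA_eq, filter_empty_iff_all]
    split_ifs with h <;> push_cast <;> omega

-- ===== VERDICT =====
theorem solution_1137_5_spec : Claim_equal_solution_1137_5 := by
  intro allowed words _
  unfold Spec_solution_1137_5 solution_1137_5 solution_1137_5_alt
  simpa using main_lemma (PySem.Set.ofList allowed.toList) words
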